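-- pv_equiv track=rewrite | github.com/eduardosferreira/ExemploPython01 | PythonPSA/PythonFundamentos/coursera/exercicios/jogo_nim.py | fnc_computador_escolhe
-- ===== SOURCE A (Python) =====
-- def fnc_computador_escolhe(p_nr_pecas, p_nr_limite):
--     """
--     Funcao usuario escolhe
--     """
--
--     nr_computador_remove = 1
--
--     while nr_computador_remove <= p_nr_limite:
--
--         if (p_nr_pecas - nr_computador_remove) % (p_nr_limite+1) == 0:
--
--             return nr_computador_remove
--
--         else:
--
--             nr_computador_remove += 1
--
--     return nr_computador_remove
-- ===== SOURCE B (Python) =====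
-- def fnc_computador_escolhe(p_nr_pecas, p_nr_limite):
--     if p_nr_limite < 1:
--         return 1
--     resto = p_nr_pecas % (p_nr_limite + 1)
--     return resto if resto else p_nr_limite + 1
-- ===== Notes on version B (the rewrite author's own statement) =====
-- stated objective: faster
-- what changed: Replaces the linear scan over 1..limit with a closed-form modular computation: resto = pecas % (limit+1), returning resto if nonzero else limit+1 (and 1 when limit < 1, where the scan never runs).
import Mathlib
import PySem

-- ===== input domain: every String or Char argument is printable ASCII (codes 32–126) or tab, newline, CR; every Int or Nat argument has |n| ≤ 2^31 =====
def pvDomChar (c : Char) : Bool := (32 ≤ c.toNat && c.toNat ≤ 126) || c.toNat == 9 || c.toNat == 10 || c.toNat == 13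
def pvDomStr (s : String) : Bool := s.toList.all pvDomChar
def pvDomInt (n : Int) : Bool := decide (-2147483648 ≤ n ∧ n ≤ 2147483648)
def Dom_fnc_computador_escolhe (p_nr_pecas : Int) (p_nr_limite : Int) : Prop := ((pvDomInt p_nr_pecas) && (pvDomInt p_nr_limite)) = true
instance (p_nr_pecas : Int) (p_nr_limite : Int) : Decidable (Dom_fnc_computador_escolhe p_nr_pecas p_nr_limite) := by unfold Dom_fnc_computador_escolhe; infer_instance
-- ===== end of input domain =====

-- B replaces A's linear scan over 1..limit with a closed-form modular computation (objective: faster, O(1) vs O(limit)).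

-- ===== PORT A =====
-- the while loop of A, state = nr_computador_remove
def fnc_computador_escolhe_loop (p_nr_pecas p_nr_limite nr : Int) : Int :=
  if nr ≤ p_nr_limite then
    if PySem.Int.mod (p_nr_pecas - nr) (p_nr_limite + 1) = 0 then nr
    else fnc_computador_escolhe_loop p_nr_pecas p_nr_limite (nr + 1)
  else nr
termination_by (p_nr_limite + 1 - nr).toNat
decreasing_by omega

def fnc_computador_escolhe (p_nr_pecas : Int) (p_nr_limite : Int) : Int :=
  fnc_computador_escolhe_loop p_nr_pecas p_nr_limite 1

-- ===== PORT B =====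
def fnc_computador_escolhe_alt (p_nr_pecas : Int) (p_nr_limite : Int) : Int :=
  if p_nr_limite < 1 then 1
  else
    let resto := PySem.Int.mod p_nr_pecas (p_nr_limite + 1)
    if resto ≠ 0 then resto else p_nr_limite + 1

-- ===== PRECONDITION & SPEC =====
def Spec_fnc_computador_escolhe (p_nr_pecas : Int) (p_nr_limite : Int) (out : Int) : Prop := out = fnc_computador_escolhe_alt p_nr_pecas p_nr_limite
instance (p_nr_pecas : Int) (p_nr_limite : Int) (out : Int) : Decidable (Spec_fnc_computador_escolhe p_nr_pecas p_nr_limite out) := by unfold Spec_fnc_computador_escolhe; infer_instance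

-- ===== CLAIM (what is proved, stated in full; the proofs are below) =====
def Claim_equal_fnc_computador_escolhe : Prop := ∀ (p_nr_pecas : Int) (p_nr_limite : Int), Dom_fnc_computador_escolhe p_nr_pecas p_nr_limite → Spec_fnc_computador_escolhe p_nr_pecas p_nr_limite (fnc_computador_escolhe p_nr_pecas p_nr_limite)

-- ===== LEMMAS AND PROOFS =====

-- On a positive modulus, A's loop test at nr ∈ [1, l] fires exactly when nr equals p mod (l+1).
lemma loop_test_iff (p l nr : Int) (h1 : 1 ≤ nr) (h2 : nr ≤ l) :
    PySem.Int.mod (p - nr) (l + 1) = 0 ↔ nr = PySem.Int.mod p (l + 1) := by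
  have hl : (0:Int) < l + 1 := by omega
  rw [PySem.Int.mod_eq_emod_of_pos hl, PySem.Int.mod_eq_emod_of_pos hl]
  have hnr : nr % (l + 1) = nr := Int.emod_eq_of_lt (by omega) (by omega)
  have hsub : (p - nr) % (l + 1) = (p % (l + 1) - nr) % (l + 1) := by
    conv_lhs => rw [Int.sub_emod]
    rw [hnr]
  have hr0 : 0 ≤ p % (l + 1) := Int.emod_nonneg p (by omega)
  have hrlt : p % (l + 1) < l + 1 := Int.emod_lt_of_pos p hl
  rw [hsub]
  constructor
  · intro h
    have hdvd : (l + 1) ∣ (p % (l + 1) - nr) := Int.dvd_of_emod_eq_zero h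
    obtain ⟨k, hk⟩ := hdvd
    rcases lt_trichotomy k 0 with hk0 | hk0 | hk0
    · nlinarith
    · subst hk0; simp at hk; omega
    · nlinarith
  · intro h
    rw [← h]
    simp

-- Invariant characterisation of A's loop: starting at nr, if no earlier index matched,
-- the loop returns p mod (l+1) when that is nonzero, and l+1 otherwise.
lemma loop_spec (p l : Int) (hl : 1 ≤ l) (nr : Int) (h1 : 1 ≤ nr) (h2 : nr ≤ l + 1)
    (hinv : PySem.Int.mod p (l + 1) = 0 ∨ nr ≤ PySem.Int.mod p (l + 1)) :
    fnc_computador_escolhe_loop p l nr =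
      if PySem.Int.mod p (l + 1) = 0 then l + 1 else PySem.Int.mod p (l + 1) := by
  have hr0 : 0 ≤ PySem.Int.mod p (l + 1) := by
    rw [PySem.Int.mod_eq_emod_of_pos (by omega : (0:Int) < l + 1)]
    exact Int.emod_nonneg p (by omega)
  have hrlt : PySem.Int.mod p (l + 1) < l + 1 := by
    rw [PySem.Int.mod_eq_emod_of_pos (by omega : (0:Int) < l + 1)]
    exact Int.emod_lt_of_pos p (by omega)
  rw [fnc_computador_escolhe_loop]
  by_cases hle : nr ≤ l
  · rw [if_pos hle]
    by_cases ht : PySem.Int.mod (p - nr) (l + 1) = 0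
    · rw [if_pos ht]
      have heq := (loop_test_iff p l nr h1 hle).mp ht
      rw [if_neg (by omega)]
      exact heq
    · rw [if_neg ht]
      have hne := (not_iff_not.mpr (loop_test_iff p l nr h1 hle)).mp ht
      exact loop_spec p l hl (nr + 1) (by omega) (by omega) (by omega)
  · rw [if_neg hle]
    rw [if_pos (by omega)]
    omega
termination_by (l + 1 - nr).toNat
decreasing_by omega

-- ===== VERDICT (by name: the statement is the Claim_ definition above) =====
theorem fnc_computador_escolhe_spec : Claim_equal_fnc_computador_escolhe := by
  intro p l _
  unfold Spec_fnc_computador_escolhe fnc_computador_escolhe fnc_computador_escolhe_alt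
  by_cases hl : l < 1
  · rw [fnc_computador_escolhe_loop]
    simp [hl, show ¬ (1:Int) ≤ l by omega]
  · push Not at hl
    have hpos : (0:Int) < l + 1 := by omega
    have hmod := Int.emod_nonneg p (by omega : l + 1 ≠ 0)
    have hmodlt := Int.emod_lt_of_pos p hpos
    have hm : PySem.Int.mod p (l+1) = p % (l+1) := PySem.Int.mod_eq_emod_of_pos hpos
    rw [loop_spec p l hl 1 le_rfl (by omega) (by rw [hm]; omega)]
    simp only [if_neg (show ¬ l < 1 by omega)]
    by_cases hz : PySem.Int.mod p (l+1) = 0 <;> simp [hz]
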